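-- pv_equiv track=rewrite | github.com/abubakarwakili9/dynohome | dataset_export_system.py | _map_phase_to_attack_type
-- ===== SOURCE A (Python) =====
-- def _map_phase_to_attack_type(phase_name: str) -> str:
--     """Map attack phase to traffic pattern type"""
--     phase_name = phase_name.lower()
--
--     if any(keyword in phase_name for keyword in ['recon', 'target', 'discovery', 'scan']):
--         return 'reconnaissance'
--     elif any(keyword in phase_name for keyword in ['exploit', 'access', 'breach', 'compromise']):
--         return 'exploitation'
--     elif any(keyword in phase_name for keyword in ['lateral', 'movement', 'propagation', 'spread']):
--         return 'lateral_movement'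
--     elif any(keyword in phase_name for keyword in ['exfiltration', 'collection', 'steal', 'extract']):
--         return 'data_exfiltration'
--     elif any(keyword in phase_name for keyword in ['dos', 'denial', 'flood', 'amplification']):
--         return 'denial_of_service'
--     else:
--         return 'command_control'
-- ===== SOURCE B (Python) =====
-- # Priority-minimisation rewrite: one flat scan over all keywords collecting the
-- # minimum rule priority that matches, then an index lookup -- no branch cascade,
-- # no per-rule any(), no short-circuiting.
-- _TYPES = ['reconnaissance', 'exploitation', 'lateral_movement',
--           'data_exfiltration', 'denial_of_service', 'command_control']
--
-- _KEYWORD_PRIORITY = {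
--     'recon': 0, 'target': 0, 'discovery': 0, 'scan': 0,
--     'exploit': 1, 'access': 1, 'breach': 1, 'compromise': 1,
--     'lateral': 2, 'movement': 2, 'propagation': 2, 'spread': 2,
--     'exfiltration': 3, 'collection': 3, 'steal': 3, 'extract': 3,
--     'dos': 4, 'denial': 4, 'flood': 4, 'amplification': 4,
-- }
--
-- def _map_phase_to_attack_type(phase_name: str) -> str:
--     p = phase_name.lower()
--     best = min((i for k, i in _KEYWORD_PRIORITY.items() if k in p), default=5)
--     return _TYPES[best]
-- ===== Notes on version B (the rewrite author's own statement) =====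
-- stated objective: alternative
-- what changed: Replaces the six-branch short-circuiting if/elif cascade with a single flat scan over a keyword->priority map that takes the minimum matching priority and then selects the result by index.
import Mathlib
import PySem

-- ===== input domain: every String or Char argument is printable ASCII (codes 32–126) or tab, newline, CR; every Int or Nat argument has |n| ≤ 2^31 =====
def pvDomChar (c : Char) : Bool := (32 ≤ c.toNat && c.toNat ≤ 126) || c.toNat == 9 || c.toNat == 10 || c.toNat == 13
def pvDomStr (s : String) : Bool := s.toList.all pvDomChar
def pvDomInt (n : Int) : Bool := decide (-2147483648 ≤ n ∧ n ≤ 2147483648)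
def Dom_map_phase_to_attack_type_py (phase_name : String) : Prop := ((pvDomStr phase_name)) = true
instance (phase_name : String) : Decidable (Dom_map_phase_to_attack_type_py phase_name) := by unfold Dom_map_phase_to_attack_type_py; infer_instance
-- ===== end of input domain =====

-- B replaces the short-circuiting if/elif cascade by one flat scan over a keyword→priority map
-- taking the minimum matching priority, then an index lookup (alternative decomposition, same cost).

-- ===== PORT A =====
def map_phase_to_attack_type_py (phase_name : String) : String :=
  let p := PySem.Str.lower phase_name
  if ["recon", "target", "discovery", "scan"].any (fun k => PySem.Str.isIn k p) then
    "reconnaissance"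
  else if ["exploit", "access", "breach", "compromise"].any (fun k => PySem.Str.isIn k p) then
    "exploitation"
  else if ["lateral", "movement", "propagation", "spread"].any (fun k => PySem.Str.isIn k p) then
    "lateral_movement"
  else if ["exfiltration", "collection", "steal", "extract"].any (fun k => PySem.Str.isIn k p) then
    "data_exfiltration"
  else if ["dos", "denial", "flood", "amplification"].any (fun k => PySem.Str.isIn k p) then
    "denial_of_service"
  else
    "command_control"

-- ===== PORT B =====
def pvTypes : List String :=
  ["reconnaissance", "exploitation", "lateral_movement",
   "data_exfiltration", "denial_of_service", "command_control"]

-- the dict _KEYWORD_PRIORITY, as an association list in insertion order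
def pvKeywordPriority : List (String × Nat) :=
  [("recon", 0), ("target", 0), ("discovery", 0), ("scan", 0),
   ("exploit", 1), ("access", 1), ("breach", 1), ("compromise", 1),
   ("lateral", 2), ("movement", 2), ("propagation", 2), ("spread", 2),
   ("exfiltration", 3), ("collection", 3), ("steal", 3), ("extract", 3),
   ("dos", 4), ("denial", 4), ("flood", 4), ("amplification", 4)]

def map_phase_to_attack_type_py_alt (phase_name : String) : String :=
  let p := PySem.Str.lower phase_name
  -- min((i for k, i in _KEYWORD_PRIORITY.items() if k in p), default=5)
  let best := (pvKeywordPriority.filterMap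
      (fun kv => if PySem.Str.isIn kv.1 p then some kv.2 else none)).foldl Nat.min 5
  pvTypes.getD best "command_control"

-- ===== PRECONDITION & SPEC =====
def Spec_map_phase_to_attack_type_py (phase_name : String) (out : String) : Prop := out = map_phase_to_attack_type_py_alt phase_name
instance (phase_name : String) (out : String) : Decidable (Spec_map_phase_to_attack_type_py phase_name out) := by unfold Spec_map_phase_to_attack_type_py; infer_instance

-- ===== CLAIM (what is proved, stated in full; the proofs are below) =====
def Claim_equal_map_phase_to_attack_type_py : Prop := ∀ (phase_name : String), Dom_map_phase_to_attack_type_py phase_name → Spec_map_phase_to_attack_type_py phase_name (map_phase_to_attack_type_py phase_name)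

-- ===== LEMMAS AND PROOFS =====

-- folding Nat.min over the priorities of the matching keywords of one rule group
-- (all sharing priority j) yields `min acc j` iff some keyword of the group matches
theorem pv_foldl_min_filter (c : String → Bool) (j : Nat) :
    ∀ (ks : List String) (acc : Nat),
      (ks.filterMap (fun k => if c k then some j else none)).foldl Nat.min acc
        = if ks.any c then Nat.min acc j else acc := by
  intro ks
  induction ks with
  | nil => intro acc; simp
  | cons k rest ih =>
      intro acc
      by_cases h : c k = true
      · simp [h, ih]
      · simp [h, ih]

-- the flat keyword→priority table is the concatenation of the five rule groups
theorem pv_table_eq :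
    pvKeywordPriority
      = (["recon", "target", "discovery", "scan"].map (fun k => (k, 0)))
        ++ (["exploit", "access", "breach", "compromise"].map (fun k => (k, 1)))
        ++ (["lateral", "movement", "propagation", "spread"].map (fun k => (k, 2)))
        ++ (["exfiltration", "collection", "steal", "extract"].map (fun k => (k, 3)))
        ++ (["dos", "denial", "flood", "amplification"].map (fun k => (k, 4))) := rfl

-- ===== VERDICT (by name: the statement is the Claim_ definition above) =====
set_option maxHeartbeats 1600000 in
theorem map_phase_to_attack_type_py_spec : Claim_equal_map_phase_to_attack_type_py := by
  intro phase_name _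
  unfold Spec_map_phase_to_attack_type_py map_phase_to_attack_type_py map_phase_to_attack_type_py_alt
  rw [pv_table_eq]
  simp only [List.filterMap_append, List.filterMap_map, Function.comp_def,
    List.foldl_append, pv_foldl_min_filter]
  generalize (["recon", "target", "discovery", "scan"].any fun k => PySem.Str.isIn k (PySem.Str.lower phase_name)) = g0
  generalize (["exploit", "access", "breach", "compromise"].any fun k => PySem.Str.isIn k (PySem.Str.lower phase_name)) = g1
  generalize (["lateral", "movement", "propagation", "spread"].any fun k => PySem.Str.isIn k (PySem.Str.lower phase_name)) = g2
  generalize (["exfiltration", "collection", "steal", "extract"].any fun k => PySem.Str.isIn k (PySem.Str.lower phase_name)) = g3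
  generalize (["dos", "denial", "flood", "amplification"].any fun k => PySem.Str.isIn k (PySem.Str.lower phase_name)) = g4
  cases g0 <;> cases g1 <;> cases g2 <;> cases g3 <;> cases g4 <;> rfl
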